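-- pv_equiv track=rewrite | github.com/HowardMak/HIT137_24S2_Group162 | A1/Q1_b.py | draw_square
-- ===== SOURCE A (Python) =====
-- def draw_square(n):
--     m = [[" "] * n for _ in range(n)]
--     for r in range(n):
--         for c in range(n):
--             if r == 0 or r == (n - 1):
--                 m[r][c] = '*'
--             if c == 0 or c == (n - 1):
--                 m[r][c] = '*'
--     return "\n".join([" ".join(row) for row in m])
-- ===== SOURCE B (Python) =====
-- def draw_square(n):
--     rows = []
--     for r in range(n):
--         if r == 0 or r == n - 1:
--             cells = ["*"] * n
--         else:
--             cells = ["*"] + [" "] * (n - 2) + ["*"]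
--         rows.append(" ".join(cells))
--     return "\n".join(rows)
-- ===== Notes on version B (the rewrite author's own statement) =====
-- stated objective: simpler
-- what changed: B replaces A's mutable n x n character grid with its nested per-cell loops and two conditional in-place assignments by a single pass over the row indices that emits each row string directly (full star row on the border, '*' + gap + '*' inside).
import Mathlib
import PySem

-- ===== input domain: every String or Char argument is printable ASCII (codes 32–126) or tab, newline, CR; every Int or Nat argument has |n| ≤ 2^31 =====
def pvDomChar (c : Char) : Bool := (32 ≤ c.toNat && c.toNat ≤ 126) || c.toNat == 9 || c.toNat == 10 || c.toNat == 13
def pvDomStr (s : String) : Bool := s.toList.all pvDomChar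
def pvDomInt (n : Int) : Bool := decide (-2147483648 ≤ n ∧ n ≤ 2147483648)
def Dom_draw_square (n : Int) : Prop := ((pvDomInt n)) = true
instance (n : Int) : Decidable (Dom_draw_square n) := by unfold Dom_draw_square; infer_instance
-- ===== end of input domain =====

-- B drops A's mutable n×n grid with its nested per-cell loops and emits each row
-- directly in one pass over range(n) (full row on the border, '*', gap, '*' inside): simpler.


-- ===== PORT A =====
-- body of the inner loop: the two in-place assignments m[r][c] = '*';
-- pySetD is exact because c ∈ range(n) is in range of the row
def aStepCell (n r : Int) (row : List String) (c : Int) : List String :=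
  let row := if r = 0 ∨ r = n - 1 then PySem.List.pySetD row c "*" else row
  if c = 0 ∨ c = n - 1 then PySem.List.pySetD row c "*" else row

-- one outer iteration: the inner loop only writes to row r, so the in-place
-- m[r][c] updates are ported as: read row r (pyGetD, exact since r ∈ range(n)),
-- run the inner loop on it, write it back (pySetD)
def aStepRow (n : Int) (m : List (List String)) (r : Int) : List (List String) :=
  PySem.List.pySetD m r
    ((PySem.List.pyRange 0 n 1).foldl (aStepCell n r) (PySem.List.pyGetD m r []))

def draw_square (n : Int) : String :=
  let m0 : List (List String) :=
    (PySem.List.pyRange 0 n 1).map (fun _ => PySem.List.pyRepeat [" "] n)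
  let m : List (List String) := (PySem.List.pyRange 0 n 1).foldl (aStepRow n) m0
  PySem.Str.join "\n" (m.map (fun row => PySem.Str.join " " row))

-- ===== PORT B =====
-- the row string for row r: full border row, or '*', gap, '*'
def bRow (n r : Int) : String :=
  PySem.Str.join " "
    (if r = 0 ∨ r = n - 1 then PySem.List.pyRepeat ["*"] n
     else ["*"] ++ PySem.List.pyRepeat [" "] (n - 2) ++ ["*"])

def draw_square_alt (n : Int) : String :=
  let rows : List String :=
    (PySem.List.pyRange 0 n 1).foldl (fun rows r => rows ++ [bRow n r]) []
  PySem.Str.join "\n" rows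

-- ===== PRECONDITION & SPEC =====
def Spec_draw_square (n : Int) (out : String) : Prop := out = draw_square_alt n
instance (n : Int) (out : String) : Decidable (Spec_draw_square n out) := by unfold Spec_draw_square; infer_instance

-- ===== CLAIM (what is proved, stated in full; the proofs are below) =====
def Claim_equal_draw_square : Prop := ∀ (n : Int), Dom_draw_square n → Spec_draw_square n (draw_square n)

-- ===== LEMMAS AND PROOFS =====

-- the cell list of row r, as B builds it (after [x]*k → replicate)
def cellsOf (n r : Int) : List String :=
  if r = 0 ∨ r = n - 1 then List.replicate n.toNat "*"
  else "*" :: (List.replicate (n - 2).toNat " " ++ ["*"])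

-- the single cell value A's inner loop leaves at column c of row r
def cellStr (n r : Int) (c : Nat) : String :=
  if (r = 0 ∨ r = n - 1) ∨ ((c : Int) = 0 ∨ (c : Int) = n - 1) then "*" else " "

lemma inner_fold (n r : Int) (N : Nat) :
    ∀ k : Nat, k ≤ N →
    (PySem.List.pyRange 0 (k : Int) 1).foldl (aStepCell n r) (List.replicate N " ")
      = (List.range N).map (fun c => if c < k then cellStr n r c else " ") := by
  intro k
  induction k with
  | zero =>
      intro _
      rw [show ((0 : Nat) : Int) = 0 from rfl, PySem.List.pyRange_one_eq_nil le_rfl]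
      simp
  | succ k ih =>
      intro hk
      have hk' : k ≤ N := Nat.le_of_succ_le hk
      have hcast : ((k + 1 : Nat) : Int) = (k : Int) + 1 := by push_cast; ring
      rw [hcast, PySem.List.pyRange_one_succ_right (by positivity), List.foldl_append,
        ih hk', List.foldl_cons, List.foldl_nil]
      set P := (List.range N).map (fun c => if c < k then cellStr n r c else " ") with hP
      have hlen : P.length = N := by simp [hP]
      have hstep : aStepCell n r P (k : Int)
          = if (r = 0 ∨ r = n - 1) ∨ ((k : Int) = 0 ∨ (k : Int) = n - 1)
            then P.set k "*" else P := by
        unfold aStepCell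
        by_cases h1 : r = 0 ∨ r = n - 1 <;> by_cases h2 : (k : Int) = 0 ∨ (k : Int) = n - 1 <;>
          simp [h1, List.set_set]
      rw [hstep]
      apply List.ext_getElem
      · split_ifs <;> simp [hlen]
      · intro j hj1 hj2
        have hjN : j < N := by
          have : ((List.range N).map (fun c => if c < k + 1 then cellStr n r c else " ")).length = N := by simp
          omega
        split_ifs with hcond
        · rw [List.getElem_set]
          by_cases hkj : k = j
          · subst hkj
            simp [cellStr]; omega
          · rw [if_neg hkj]
            simp only [hP, List.getElem_map, List.getElem_range]
            have : j < k ↔ j < k + 1 := by omega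
            simp [this]
        · simp only [hP, List.getElem_map, List.getElem_range]
          by_cases hkj : j = k
          · subst hkj
            simp [cellStr]; omega
          · have : j < k ↔ j < k + 1 := by omega
            simp [this]

lemma cells_eq (n : Int) (N : Nat) (hN : n = (N : Int)) (r : Int)
    (hr0 : 0 ≤ r) (hr : r < n) :
    (List.range N).map (fun c => if c < N then cellStr n r c else " ") = cellsOf n r := by
  rw [List.map_congr_left (fun c hc => if_pos (List.mem_range.mp hc) :
    ∀ c ∈ List.range N, (if c < N then cellStr n r c else " ") = cellStr n r c)]
  by_cases hb : r = 0 ∨ r = n - 1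
  · rw [cellsOf, if_pos hb]
    rw [List.map_congr_left (fun c _ => by simp [cellStr, hb] :
      ∀ c ∈ List.range N, cellStr n r c = "*")]
    simp [List.map_const', hN]
  · rw [cellsOf, if_neg hb]
    rw [not_or] at hb
    obtain ⟨M, hM⟩ : ∃ M, N = M + 2 := ⟨N - 2, by omega⟩
    subst hM
    rw [show List.range (M + 2) = 0 :: (List.range M).map Nat.succ ++ [M + 1] by
      rw [List.range_succ, List.range_succ_eq_map]]
    simp only [List.map_append, List.map_cons, List.map_nil, List.map_map]
    have hh : cellStr n r 0 = "*" := by simp [cellStr]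
    have ht : cellStr n r (M + 1) = "*" := by unfold cellStr; rw [if_pos (by omega)]
    have hm : ∀ c ∈ List.range M, (cellStr n r ∘ Nat.succ) c = " " := by
      intro c hc
      have hcM := List.mem_range.mp hc
      simp only [cellStr, Function.comp_apply]
      rw [if_neg (by push_cast; omega)]
    rw [hh, ht, List.map_congr_left hm, List.map_const']
    have h2 : (n - 2).toNat = M := by omega
    simp [h2]

lemma outer_fold (n : Int) (N : Nat) (hN : n = (N : Int)) :
    ∀ k : Nat, k ≤ N →
    (PySem.List.pyRange 0 (k : Int) 1).foldl (aStepRow n)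
        ((List.range N).map (fun _ => List.replicate N " "))
      = (List.range N).map
          (fun r => if r < k then cellsOf n (r : Int) else List.replicate N " ") := by
  intro k
  induction k with
  | zero =>
      intro _
      rw [show ((0 : Nat) : Int) = 0 from rfl, PySem.List.pyRange_one_eq_nil le_rfl]
      simp
  | succ k ih =>
      intro hk
      have hk' : k ≤ N := Nat.le_of_succ_le hk
      have hkN : k < N := hk
      have hcast : ((k + 1 : Nat) : Int) = (k : Int) + 1 := by push_cast; ring
      rw [hcast, PySem.List.pyRange_one_succ_right (by positivity), List.foldl_append,
        ih hk', List.foldl_cons, List.foldl_nil]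
      set Mk := (List.range N).map
        (fun r => if r < k then cellsOf n (r : Int) else List.replicate N " ") with hMk
      have hlen : Mk.length = N := by simp [hMk]
      have hget : PySem.List.pyGetD Mk ((k : Nat) : Int) ([] : List String)
          = List.replicate N " " := by
        rw [PySem.List.pyGetD_natCast, List.getD_eq_getElem _ _ (by omega)]
        simp [hMk]
      have hrow : (PySem.List.pyRange 0 n 1).foldl (aStepCell n (k : Int))
          (List.replicate N " ") = cellsOf n (k : Int) := by
        rw [hN, inner_fold ((N : Nat) : Int) (k : Int) N N le_rfl]
        exact cells_eq ((N : Nat) : Int) N rfl (k : Int) (by positivity) (by omega)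
      unfold aStepRow
      rw [hget, hrow, PySem.List.pySetD_natCast]
      apply List.ext_getElem
      · simp [hlen]
      · intro j hj1 hj2
        have hjN : j < N := by
          have : Mk.length = N := hlen
          simp only [List.length_set, this] at hj1
          exact hj1
        rw [List.getElem_set]
        by_cases hkj : k = j
        · subst hkj
          simp
        · rw [if_neg hkj]
          simp only [hMk, List.getElem_map, List.getElem_range]
          have : j < k ↔ j < k + 1 := by omega
          simp [this]

lemma bRow_eq (n r : Int) : bRow n r = PySem.Str.join " " (cellsOf n r) := by
  simp [bRow, cellsOf, PySem.List.pyRepeat_singleton]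

-- ===== VERDICT (by name: the statement is the Claim_ definition above) =====
theorem draw_square_spec : Claim_equal_draw_square := by
  intro n _
  unfold Spec_draw_square draw_square draw_square_alt
  simp only [PySem.List.foldl_append_singleton_eq_map, List.nil_append]
  rcases (by omega : n ≤ 0 ∨ 0 < n) with hn | hn
  · rw [PySem.List.pyRange_one_eq_nil hn]
    rfl
  · have hN : n = ((n.toNat : Nat) : Int) := by omega
    have hm0 : (PySem.List.pyRange 0 n 1).map
          (fun _ => PySem.List.pyRepeat ([" "] : List String) n)
        = (List.range n.toNat).map (fun _ => List.replicate n.toNat " ") := by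
      rw [PySem.List.pyRange_zero n, List.map_map]
      exact List.map_congr_left fun _ _ => by
        simp [PySem.List.pyRepeat_singleton]
    have hout := outer_fold n n.toNat hN n.toNat le_rfl
    rw [← hN] at hout
    rw [hm0, hout]
    rw [PySem.List.pyRange_zero n, List.map_map, List.map_map]
    apply congrArg
    apply List.map_congr_left
    intro r hr
    have hrN : r < n.toNat := List.mem_range.mp hr
    simp only [Function.comp, if_pos hrN, bRow_eq]
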